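-- pv_equiv track=rewrite | github.com/stschwark/advent-of-code-2018 | puzzle/day01.py | recurring_frequency
-- ===== SOURCE A (Python) =====
-- def recurring_frequency(changes):
--     result = 0
--     seen = {0}
--
--     while True:
--         for change in changes:
--             result += int(change)
--
--             if result in seen:
--                 return result
--
--             seen.add(result)
-- ===== SOURCE B (Python) =====
-- def recurring_frequency(changes):
--     # Closed-form: the first repeated cumulative frequency is determined by
--     # pairs of prefix sums congruent modulo the per-pass total; pick the pair
--     # whose repeat happens earliest in the simulated stream (min cycles d,
--     # then min in-pass position j).
--     deltas = [int(c) for c in changes]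
--     prefix = [0]
--     for d in deltas:
--         prefix.append(prefix[-1] + d)
--     total = prefix[-1]
--     n = len(deltas)
--     best = None  # (cycles, position, repeated value)
--     for j in range(1, n + 1):
--         for i in range(0, n + 1):
--             diff = prefix[i] - prefix[j]
--             if total == 0:
--                 if diff != 0:
--                     continue
--                 d = 0
--             else:
--                 if diff % total != 0:
--                     continue
--                 d = diff // total
--             if d > 0 or (d == 0 and i < j):
--                 cand = (d, j, prefix[i])
--                 if best is None or cand < best:
--                     best = cand
--     return best[2]
-- ===== Notes on version B (the rewrite author's own statement) =====
-- stated objective: alternative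
-- what changed: B replaces the unbounded repeat-until-seen simulation by a closed-form computation: one pass of prefix sums, then a minimization over pairs of prefix sums congruent modulo the cycle total, picking the pair whose repeat occurs earliest (fewest cycles, then earliest in-pass position); its running time no longer depends on how many cycles the simulation would need.
import Mathlib
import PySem

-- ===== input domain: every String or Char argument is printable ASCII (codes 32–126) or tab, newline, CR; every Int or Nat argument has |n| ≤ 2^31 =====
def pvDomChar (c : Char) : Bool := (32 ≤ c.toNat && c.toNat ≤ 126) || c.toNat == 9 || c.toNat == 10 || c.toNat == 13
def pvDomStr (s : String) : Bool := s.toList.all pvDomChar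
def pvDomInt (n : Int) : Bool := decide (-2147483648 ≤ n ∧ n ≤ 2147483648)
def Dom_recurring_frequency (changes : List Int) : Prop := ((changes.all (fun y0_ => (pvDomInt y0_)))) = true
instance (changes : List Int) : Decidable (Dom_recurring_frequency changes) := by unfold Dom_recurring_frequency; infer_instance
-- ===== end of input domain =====

-- B re-implements the repeat-until-seen simulation as a closed-form minimization over
-- congruent pairs of pfx sums (one pfx pass + a pair scan); return value only.
-- A's port uses fuel 2*(sum of |changes|)+2 passes, proved sufficient on Pre_ below.


-- ===== PORT A =====
-- the inner 'for change in changes' loop: .inl v = early 'return v', .inr = state after the pass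
def pvAFor (changes : List Int) (result : Int) (seen : PySem.Set Int) :
    Sum Int (Int × PySem.Set Int) :=
  match changes with
  | [] => .inr (result, seen)
  | c :: rest =>
    let r := result + c          -- result += int(change); int() is the identity on ints
    if PySem.Set.contains seen r then .inl r
    else pvAFor rest r (PySem.Set.add seen r)

-- the 'while True' loop; fuel bounds the number of passes (the Python loops forever outside Pre_)
def pvAWhile (changes : List Int) : Nat → Int → PySem.Set Int → Int
  | 0, _, _ => 0
  | fuel + 1, result, seen =>
    match pvAFor changes result seen with
    | .inl v => v
    | .inr (r, s) => pvAWhile changes fuel r s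

def recurring_frequency (changes : List Int) : Int :=
  pvAWhile changes (2 * (changes.map Int.natAbs).sum + 2) 0 (PySem.Set.ofList [0])

-- ===== PORT B =====
-- pfx = [0]; for d in deltas: pfx.append(pfx[-1] + d)
def pvBPrefix (deltas : List Int) : List Int :=
  deltas.foldl (fun pre d => pre ++ [PySem.List.pyGetD pre (-1) 0 + d]) [0]

-- Python tuple comparison (d, j, val) < (d', j', val')
def pvTripLt (a b : Int × Int × Int) : Bool :=
  a.1 < b.1 || (a.1 == b.1 && (a.2.1 < b.2.1 || (a.2.1 == b.2.1 && a.2.2 < b.2.2)))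

-- 'if best is None or cand < best: best = cand'
def pvBUpd (best : Option (Int × Int × Int)) (cand : Int × Int × Int) : Option (Int × Int × Int) :=
  match best with
  | none => some cand
  | some b => if pvTripLt cand b then some cand else some b

-- body of the inner 'for i in range(0, n+1)' loop ('continue' = return best unchanged)
def pvBBody (pfx : List Int) (total : Int) (j : Int)
    (best : Option (Int × Int × Int)) (i : Int) : Option (Int × Int × Int) :=
  let diff := PySem.List.pyGetD pfx i 0 - PySem.List.pyGetD pfx j 0
  if total = 0 then
    if diff ≠ 0 then best
    else if (0 : Int) > 0 ∨ ((0 : Int) = 0 ∧ i < j) then pvBUpd best (0, j, PySem.List.pyGetD pfx i 0) else best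
  else
    if PySem.Int.mod diff total ≠ 0 then best
    else
      let d := PySem.Int.floordiv diff total
      if d > 0 ∨ (d = 0 ∧ i < j) then pvBUpd best (d, j, PySem.List.pyGetD pfx i 0) else best

def recurring_frequency_alt (changes : List Int) : Int :=
  let deltas := changes                     -- [int(c) for c in changes]: identity on ints
  let pfx := pvBPrefix deltas
  let total := PySem.List.pyGetD pfx (-1) 0
  let n : Int := (deltas.length : Int)
  let best :=
    (PySem.List.pyRange 1 (n + 1) 1).foldl
      (fun best j => (PySem.List.pyRange 0 (n + 1) 1).foldl (pvBBody pfx total j) best)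
      none
  match best with
  | some t => t.2.2
  | none => 0                               -- 'best[2]' raises on None; unreachable under Pre_

-- ===== PRECONDITION & SPEC =====
-- pfx sum of the first k changes
def pvPf (changes : List Int) (k : Nat) : Int := (changes.take k).sum

-- Pre_: exactly the inputs on which A's while-loop ever sees a repeat (terminates): the list is
-- nonempty and some pair of pfx sums is congruent modulo the cycle total with the repeat
-- lying forward in time; on all other inputs the Python A loops forever.
def Pre_recurring_frequency (changes : List Int) : Prop :=
  changes ≠ [] ∧
  ∃ i < changes.length + 1, ∃ j < changes.length + 1, 1 ≤ j ∧
    (if changes.sum = 0 then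
       pvPf changes i = pvPf changes j ∧ i < j
     else
       changes.sum ∣ (pvPf changes i - pvPf changes j) ∧
         (0 < (pvPf changes i - pvPf changes j) / changes.sum ∨
          (pvPf changes i = pvPf changes j ∧ i < j)))

instance (changes : List Int) : Decidable (Pre_recurring_frequency changes) := by
  unfold Pre_recurring_frequency; infer_instance

def pvWitness_recurring_frequency : List Int := [1, -1]

def Spec_recurring_frequency (changes : List Int) (out : Int) : Prop := out = recurring_frequency_alt changes
instance (changes : List Int) (out : Int) : Decidable (Spec_recurring_frequency changes out) := by unfold Spec_recurring_frequency; infer_instance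

-- ===== CLAIM (what is proved, stated in full; the proofs are below) =====
def Claim_equal_recurring_frequency : Prop := ∀ (changes : List Int), Dom_recurring_frequency changes → Pre_recurring_frequency changes → Spec_recurring_frequency changes (recurring_frequency changes)

-- ===== LEMMAS AND PROOFS =====

/- ---------- shared notions ---------- -/

-- successive values of `result` within one pass starting from r
def pvPsums (r : Int) : List Int → List Int
  | [] => []
  | c :: cs => (r + c) :: pvPsums (r + c) cs

-- (i, j, d) is a "repeat pair": prefix value i reappears at in-pass position j after d extra cycles
def pvCand (changes : List Int) (i j d : ℕ) : Prop :=
  i ≤ changes.length ∧ 1 ≤ j ∧ j ≤ changes.length ∧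
    pvPf changes i - pvPf changes j = (d : ℤ) * changes.sum ∧
    (0 < d ∨ (d = 0 ∧ i < j))

-- (D, J) is the lexicographically least (cycles, position) among all repeat pairs
def pvIsBest (changes : List Int) (D J : ℕ) : Prop :=
  (∃ i, pvCand changes i J D) ∧
  ∀ i j d, pvCand changes i j d → D < d ∨ (D = d ∧ J ≤ j)

/- ---------- pvPf / pvPsums basics ---------- -/

theorem pvPf_len (changes : List Int) : pvPf changes changes.length = changes.sum := by
  simp [pvPf]

theorem pvPsums_length (cs : List Int) : ∀ r, (pvPsums r cs).length = cs.length := by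
  induction cs with
  | nil => intro r; rfl
  | cons c cs ih => intro r; simp [pvPsums, ih]

theorem pvPsums_getElem (cs : List Int) : ∀ (r : Int) (m : ℕ) (h : m < cs.length),
    (pvPsums r cs)[m]'(by rw [pvPsums_length]; exact h) = r + (cs.take (m + 1)).sum := by
  induction cs with
  | nil => intro r m h; simp at h
  | cons c cs ih =>
      intro r m h
      cases m with
      | zero => simp [pvPsums]
      | succ m =>
          simp only [pvPsums, List.getElem_cons_succ]
          rw [ih (r + c) m (by simpa using h)]
          simp [List.take_succ_cons]
          ring

theorem natAbs_sum_le (l : List Int) : l.sum.natAbs ≤ (l.map Int.natAbs).sum := by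
  induction l with
  | nil => simp
  | cons c cs ih =>
      simp only [List.sum_cons, List.map_cons]
      have := Int.natAbs_add_le c cs.sum
      omega

theorem pvPf_natAbs_le (changes : List Int) (k : ℕ) :
    (pvPf changes k).natAbs ≤ (changes.map Int.natAbs).sum := by
  have h1 := natAbs_sum_le (changes.take k)
  have h2 : (changes.map Int.natAbs) =
      ((changes.take k).map Int.natAbs) ++ ((changes.drop k).map Int.natAbs) := by
    rw [← List.map_append, List.take_append_drop]
  rw [h2, List.sum_append]
  unfold pvPf
  omega

/- ---------- B side: prefix list ---------- -/

theorem pyGetD_last (l : List Int) (r : Int) (h : l.getLast? = some r) :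
    PySem.List.pyGetD l (-1) 0 = r := by
  obtain ⟨l', rfl⟩ := List.getLast?_eq_some_iff.1 h
  simp [PySem.List.pyGetD, PySem.List.pyGet?, PySem.List.pyIdx?]

theorem pvBPrefix_foldl (cs : List Int) : ∀ (pre : List Int) (r : Int),
    pre.getLast? = some r →
    cs.foldl (fun pre d => pre ++ [PySem.List.pyGetD pre (-1) 0 + d]) pre = pre ++ pvPsums r cs := by
  induction cs with
  | nil => intro pre r _; simp [pvPsums]
  | cons c cs ih =>
      intro pre r h
      simp only [List.foldl_cons]
      rw [pyGetD_last pre r h, ih (pre ++ [r + c]) (r + c) List.getLast?_concat]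
      simp [pvPsums]

theorem pvBPrefix_eq (changes : List Int) :
    pvBPrefix changes = (List.range (changes.length + 1)).map (pvPf changes) := by
  unfold pvBPrefix
  rw [pvBPrefix_foldl changes [0] 0 rfl]
  apply List.ext_getElem
  · simp [pvPsums_length]
  · intro m h1 h2
    cases m with
    | zero => simp [pvPf]
    | succ m =>
        have hm : m < changes.length := by simpa [pvPsums_length] using h1
        simp only [List.singleton_append, List.getElem_cons_succ]
        rw [pvPsums_getElem changes 0 m hm]
        simp [pvPf]

theorem pvPfx_get (changes : List Int) (i : ℤ) (h0 : 0 ≤ i) (h1 : i < (changes.length : ℤ) + 1) :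
    PySem.List.pyGetD (pvBPrefix changes) i 0 = pvPf changes i.toNat := by
  rw [pvBPrefix_eq, PySem.List.pyGetD_of_nonneg _ _ h0]
  have hlt : i.toNat < changes.length + 1 := by omega
  rw [List.getD_eq_getElem?_getD]
  simp [hlt]

theorem pvPfx_last (changes : List Int) :
    PySem.List.pyGetD (pvBPrefix changes) (-1) 0 = changes.sum := by
  rw [pvBPrefix_eq]
  have hl : (List.map (pvPf changes) (List.range (changes.length + 1))).getLast?
      = some (pvPf changes changes.length) := by
    rw [List.range_succ, List.map_append]; simp
  rw [pyGetD_last _ _ hl, pvPf_len]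

/- ---------- B side: candidate extraction ---------- -/

def pvCandOpt (pfx : List Int) (total j i : Int) : Option (Int × Int × Int) :=
  let diff := PySem.List.pyGetD pfx i 0 - PySem.List.pyGetD pfx j 0
  if total = 0 then
    if diff ≠ 0 then none
    else if (0 : Int) > 0 ∨ ((0 : Int) = 0 ∧ i < j) then some (0, j, PySem.List.pyGetD pfx i 0) else none
  else
    if PySem.Int.mod diff total ≠ 0 then none
    else
      let d := PySem.Int.floordiv diff total
      if d > 0 ∨ (d = 0 ∧ i < j) then some (d, j, PySem.List.pyGetD pfx i 0) else none

theorem pvBBody_eq (pfx : List Int) (total j : Int) (b : Option (Int × Int × Int)) (i : Int) :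
    pvBBody pfx total j b i =
      match pvCandOpt pfx total j i with
      | none => b
      | some c => pvBUpd b c := by
  unfold pvBBody pvCandOpt
  split_ifs <;> simp_all [pvBUpd] <;> split_ifs <;> simp_all

theorem floordiv_of_dvd (a b : Int) (_hb : b ≠ 0) (h : b ∣ a) :
    PySem.Int.floordiv a b * b = a := by
  have := PySem.Int.floordiv_mul_add_mod a b
  rw [(PySem.Int.mod_eq_zero_iff_dvd a b).2 h] at this
  omega

/- ---------- B side: fold shape ---------- -/

theorem foldl_candOpt (f : Int → Option (Int × Int × Int)) (l : List Int) :
    ∀ (b : Option (Int × Int × Int)),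
    l.foldl (fun b x => match f x with | none => b | some c => pvBUpd b c) b =
      (l.filterMap f).foldl pvBUpd b := by
  induction l with
  | nil => intro b; rfl
  | cons x l ih =>
      intro b
      simp only [List.foldl_cons, List.filterMap_cons]
      cases f x <;> simp [ih]

theorem foldl_flat (f : Int → List (Int × Int × Int)) (l : List Int) :
    ∀ (b : Option (Int × Int × Int)),
    l.foldl (fun b a => (f a).foldl pvBUpd b) b = (l.flatMap f).foldl pvBUpd b := by
  induction l with
  | nil => intro b; rfl
  | cons x l ih => intro b; simp only [List.foldl_cons, List.flatMap_cons, List.foldl_append, ih]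

/- ---------- B side: min over the candidate list ---------- -/

theorem pvTripLt_iff (a b : Int × Int × Int) :
    pvTripLt a b = true ↔
      (a.1 < b.1 ∨ (a.1 = b.1 ∧ (a.2.1 < b.2.1 ∨ (a.2.1 = b.2.1 ∧ a.2.2 < b.2.2)))) := by
  simp [pvTripLt]

theorem pvTripLt_connex (a b : Int × Int × Int) (h1 : pvTripLt a b = false)
    (h2 : pvTripLt b a = false) : a = b := by
  rw [Bool.eq_false_iff, Ne, pvTripLt_iff] at h1 h2
  obtain ⟨a1, a2, a3⟩ := a; obtain ⟨b1, b2, b3⟩ := b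
  dsimp only at h1 h2
  simp only [Prod.mk.injEq]
  omega

theorem pvTripLt_trans (a b c : Int × Int × Int) (h1 : pvTripLt a b = true)
    (h2 : pvTripLt b c = true) : pvTripLt a c = true := by
  rw [pvTripLt_iff] at *
  omega

theorem foldl_pvBUpd_isSome (l : List (Int × Int × Int)) :
    ∀ b, ∃ m, l.foldl pvBUpd (some b) = some m := by
  induction l with
  | nil => intro b; exact ⟨b, rfl⟩
  | cons x l ih =>
      intro b
      simp only [List.foldl_cons, pvBUpd]
      split_ifs <;> apply ih

theorem foldl_pvBUpd_mem (l : List (Int × Int × Int)) :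
    ∀ (b : Option (Int × Int × Int)) (m : Int × Int × Int), l.foldl pvBUpd b = some m →
      b = some m ∨ m ∈ l := by
  induction l with
  | nil => intro b m h; exact Or.inl h
  | cons x l ih =>
      intro b m h
      simp only [List.foldl_cons] at h
      rcases ih _ m h with h' | h'
      · cases b with
        | none => simp [pvBUpd] at h'; right; simp [h']
        | some b0 =>
            simp only [pvBUpd] at h'
            split_ifs at h' with hlt
            · right; simp at h'; simp [h']
            · left; simpa using h'
      · right; exact List.mem_cons_of_mem _ h'

theorem pvTripLt_irrefl (a : Int × Int × Int) : pvTripLt a a = false := by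
  simp [pvTripLt]

theorem foldl_pvBUpd_min (l : List (Int × Int × Int)) :
    ∀ (b : Int × Int × Int) (m : Int × Int × Int), l.foldl pvBUpd (some b) = some m →
      pvTripLt b m = false ∧ ∀ x ∈ l, pvTripLt x m = false := by
  induction l with
  | nil =>
      intro b m h
      simp only [List.foldl_nil, Option.some.injEq] at h
      subst h
      exact ⟨pvTripLt_irrefl b, by simp⟩
  | cons x l ih =>
      intro b m h
      simp only [List.foldl_cons, pvBUpd] at h
      split_ifs at h with hlt
      · obtain ⟨hxm, hrest⟩ := ih x m h
        have hbm : pvTripLt b m = false := by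
          by_contra hc
          rw [Bool.not_eq_false] at hc
          have := pvTripLt_trans x b m hlt hc
          simp [this] at hxm
        exact ⟨hbm, by
          intro y hy
          rcases List.mem_cons.1 hy with rfl | hy'
          · exact hxm
          · exact hrest y hy'⟩
      · obtain ⟨hbm, hrest⟩ := ih b m h
        have hxb : pvTripLt x b = false := by simpa using hlt
        have hxm : pvTripLt x m = false := by
          by_contra hc
          rw [Bool.not_eq_false] at hc
          by_cases hmb : pvTripLt m b = true
          · have := pvTripLt_trans x m b hc hmb
            simp [this] at hxb
          · have hbm' := pvTripLt_connex b m hbm (by simpa using hmb)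
            subst hbm'
            simp [hc] at hxb
        exact ⟨hbm, by
          intro y hy
          rcases List.mem_cons.1 hy with rfl | hy'
          · exact hxm
          · exact hrest y hy'⟩

theorem foldl_pvBUpd_eq_target (l : List (Int × Int × Int)) (t : Int × Int × Int)
    (hmem : t ∈ l) (hmin : ∀ x ∈ l, t = x ∨ pvTripLt t x = true) :
    l.foldl pvBUpd none = some t := by
  cases l with
  | nil => simp at hmem
  | cons a l' =>
      obtain ⟨m, hm⟩ := foldl_pvBUpd_isSome l' a
      have hfold : (a :: l').foldl pvBUpd none = some m := by
        simpa [pvBUpd] using hm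
      rw [hfold]
      have hmm := foldl_pvBUpd_mem l' (some a) m hm
      have hmin' := foldl_pvBUpd_min l' a m hm
      have hxm : ∀ x ∈ a :: l', pvTripLt x m = false := by
        intro x hx
        rcases List.mem_cons.1 hx with rfl | hx'
        · exact hmin'.1
        · exact hmin'.2 x hx'
      have hmem_m : m ∈ a :: l' := by
        rcases hmm with h | h
        · simp only [Option.some.injEq] at h
          simp [h]
        · exact List.mem_cons_of_mem _ h
      rcases hmin m hmem_m with rfl | hlt
      · rfl
      · simp [hxm t hmem] at hlt

/- ---------- B side: main ---------- -/


theorem bestD_zero (changes : List Int) (D J : ℕ) (hne : changes ≠ [])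
    (hbest : pvIsBest changes D J) (hT : changes.sum = 0) : D = 0 := by
  have hn : 0 < changes.length := List.length_pos_of_ne_nil hne
  have hcand : pvCand changes 0 changes.length 0 := by
    refine ⟨Nat.zero_le _, hn, le_refl _, ?_, Or.inr ⟨rfl, hn⟩⟩
    simp [pvPf, List.take_length, hT]
  rcases hbest.2 0 changes.length 0 hcand with h | h
  · omega
  · exact h.1

theorem pvCandOpt_some_iff (changes : List Int) (i j : ℤ) (t : Int × Int × Int)
    (h0i : 0 ≤ i) (hin : i < (changes.length : ℤ) + 1)
    (h1j : 1 ≤ j) (hjn : j < (changes.length : ℤ) + 1) :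
    pvCandOpt (pvBPrefix changes) changes.sum j i = some t ↔
      ∃ d : ℕ, pvCand changes i.toNat j.toNat d ∧ (changes.sum = 0 → d = 0) ∧
        t = ((d : ℤ), j, pvPf changes j.toNat + (d : ℤ) * changes.sum) := by
  have hgi := pvPfx_get changes i h0i hin
  have hgj := pvPfx_get changes j (by omega) hjn
  simp only [pvCandOpt, hgi, hgj]
  set a := pvPf changes i.toNat with ha
  set b := pvPf changes j.toNat with hb
  by_cases hT : changes.sum = 0
  · rw [if_pos hT]
    by_cases hd : a - b = 0
    · rw [if_neg (by omega : ¬ (a - b ≠ 0))]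
      by_cases hij : i < j
      · rw [if_pos (Or.inr ⟨trivial, hij⟩ : (0:ℤ) > 0 ∨ True ∧ i < j)]
        constructor
        · intro h
          injection h with h
          refine ⟨0, ⟨by omega, by omega, by omega, by rw [hT]; omega, Or.inr ⟨rfl, by omega⟩⟩,
            fun _ => rfl, ?_⟩
          rw [← h, hT]
          simp only [Nat.cast_zero, Prod.mk.injEq]
          refine ⟨by simp, by simp, by omega⟩
        · rintro ⟨d, hc, hd0, rfl⟩
          have hd' : d = 0 := hd0 hT
          subst hd'
          rw [hT]
          simp only [Nat.cast_zero, Option.some.injEq, Prod.mk.injEq]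
          refine ⟨by simp, by simp, by omega⟩
      · rw [if_neg (by simp [hij] : ¬ ((0:ℤ) > 0 ∨ True ∧ i < j))]
        constructor
        · intro h; cases h
        · rintro ⟨d, hc, hd0, rfl⟩
          have hd' : d = 0 := hd0 hT
          subst hd'
          rcases hc.2.2.2.2 with h | h
          · omega
          · exact absurd (by omega : i < j) hij
    · rw [if_pos (by omega)]
      constructor
      · intro h; cases h
      · rintro ⟨d, hc, hd0, rfl⟩
        have := hc.2.2.2.1
        rw [hT] at this
        omega
  · rw [if_neg hT]
    by_cases hdvd : changes.sum ∣ (a - b)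
    · have hmod : PySem.Int.mod (a - b) changes.sum = 0 :=
        (PySem.Int.mod_eq_zero_iff_dvd _ _).2 hdvd
      rw [if_neg (by simp [hmod])]
      have hqT : PySem.Int.floordiv (a - b) changes.sum * changes.sum = a - b :=
        floordiv_of_dvd _ _ hT hdvd
      set q := PySem.Int.floordiv (a - b) changes.sum with hq
      by_cases hcond : q > 0 ∨ (q = 0 ∧ i < j)
      · rw [if_pos hcond]
        have hq0 : 0 ≤ q := by rcases hcond with h | ⟨h, _⟩ <;> omega
        constructor
        · intro h
          injection h with h
          refine ⟨q.toNat, ⟨by omega, by omega, by omega, ?_, ?_⟩, fun h0 => absurd h0 hT, ?_⟩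
          · rw [← ha, ← hb, Int.toNat_of_nonneg hq0]; omega
          · rcases hcond with hgt | ⟨heq0, hij⟩
            · left; omega
            · right; exact ⟨by omega, by omega⟩
          · rw [← h, Int.toNat_of_nonneg hq0]
            simp only [Prod.mk.injEq]
            refine ⟨by simp, by simp, by omega⟩
        · rintro ⟨d, hc, _, rfl⟩
          obtain ⟨_, _, _, heq, hcnd⟩ := hc
          have hqd : q = (d : ℤ) := by
            apply mul_right_cancel₀ hT
            rw [hqT, ← ha, ← hb] at *
            omega
          rw [hqd]
          simp only [Option.some.injEq, Prod.mk.injEq]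
          refine ⟨by simp, by simp, by rw [ha, hb]; linear_combination heq⟩
      · rw [if_neg hcond]
        constructor
        · intro h; cases h
        · rintro ⟨d, hc, _, rfl⟩
          exfalso
          obtain ⟨_, _, _, heq, hcnd⟩ := hc
          have hqd : q = (d : ℤ) := by
            apply mul_right_cancel₀ hT
            rw [hqT, ← ha, ← hb] at *
            omega
          apply hcond
          rcases hcnd with h | ⟨h1, h2⟩
          · left; omega
          · right; exact ⟨by omega, by omega⟩
    · have hmod : PySem.Int.mod (a - b) changes.sum ≠ 0 := fun h =>
        hdvd ((PySem.Int.mod_eq_zero_iff_dvd _ _).1 h)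
      rw [if_pos (by simpa using hmod)]
      constructor
      · intro h; cases h
      · rintro ⟨d, hc, _, rfl⟩
        exact absurd ⟨(d : ℤ), by rw [ha, hb, hc.2.2.2.1]; ring⟩ hdvd

theorem mem_pvCL (changes : List Int) (t : Int × Int × Int) :
    (t ∈ (PySem.List.pyRange 1 ((changes.length : ℤ) + 1) 1).flatMap
        (fun j => (PySem.List.pyRange 0 ((changes.length : ℤ) + 1) 1).filterMap
          (pvCandOpt (pvBPrefix changes) changes.sum j))) ↔
      ∃ i j d : ℕ, pvCand changes i j d ∧ (changes.sum = 0 → d = 0) ∧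
        t = ((d : ℤ), (j : ℤ), pvPf changes j + (d : ℤ) * changes.sum) := by
  rw [List.mem_flatMap]
  constructor
  · rintro ⟨j, hj, ht⟩
    rw [List.mem_filterMap] at ht
    obtain ⟨i, hi, hsome⟩ := ht
    rw [PySem.List.mem_pyRange_one] at hj hi
    rw [pvCandOpt_some_iff changes i j t hi.1 hi.2 hj.1 hj.2] at hsome
    obtain ⟨d, hc, hd0, rfl⟩ := hsome
    refine ⟨i.toNat, j.toNat, d, hc, hd0, ?_⟩
    rw [Int.toNat_of_nonneg (by omega : (0:ℤ) ≤ j)]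
  · rintro ⟨i, j, d, hc, hd0, rfl⟩
    obtain ⟨hi, hj1, hjn, _, _⟩ := hc
    refine ⟨(j : ℤ), by rw [PySem.List.mem_pyRange_one]; omega, ?_⟩
    rw [List.mem_filterMap]
    refine ⟨(i : ℤ), by rw [PySem.List.mem_pyRange_one]; omega, ?_⟩
    rw [pvCandOpt_some_iff changes _ _ _ (by omega) (by omega) (by omega) (by omega)]
    refine ⟨d, ?_, hd0, by simp⟩
    simpa using ⟨hi, hj1, hjn, ‹_›, ‹_›⟩

theorem alt_eq_best (changes : List Int) (D J : ℕ)
    (hne : changes ≠ []) (hbest : pvIsBest changes D J) :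
    recurring_frequency_alt changes = pvPf changes J + (D : ℤ) * changes.sum := by
  obtain ⟨i0, hc0⟩ := hbest.1
  have hD0 : changes.sum = 0 → D = 0 := fun hT => bestD_zero changes D J hne hbest hT
  set t0 : Int × Int × Int := ((D : ℤ), (J : ℤ), pvPf changes J + (D : ℤ) * changes.sum) with ht0
  set CL : List (Int × Int × Int) :=
    (PySem.List.pyRange 1 ((changes.length : ℤ) + 1) 1).flatMap
      (fun j => (PySem.List.pyRange 0 ((changes.length : ℤ) + 1) 1).filterMap
        (pvCandOpt (pvBPrefix changes) changes.sum j)) with hCL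
  have hmem : t0 ∈ CL := (mem_pvCL changes t0).2 ⟨i0, J, D, hc0, hD0, rfl⟩
  have hmin : ∀ x ∈ CL, t0 = x ∨ pvTripLt t0 x = true := by
    intro x hx
    obtain ⟨i, j, d, hc, _, rfl⟩ := (mem_pvCL changes x).1 hx
    rcases hbest.2 i j d hc with h | ⟨h1, h2⟩
    · right; rw [pvTripLt_iff, ht0]; left; dsimp; exact_mod_cast h
    · rcases lt_or_eq_of_le h2 with h3 | h3
      · right; rw [pvTripLt_iff, ht0]; right; dsimp
        exact ⟨by exact_mod_cast h1, Or.inl (by exact_mod_cast h3)⟩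
      · left; rw [ht0, h1, h3]
  have hfold := foldl_pvBUpd_eq_target CL t0 hmem hmin
  have hstep1 : ∀ (b : Option (Int × Int × Int)) (j : Int),
      (PySem.List.pyRange 0 ((changes.length : ℤ) + 1) 1).foldl
        (pvBBody (pvBPrefix changes) changes.sum j) b
      = ((PySem.List.pyRange 0 ((changes.length : ℤ) + 1) 1).filterMap
          (pvCandOpt (pvBPrefix changes) changes.sum j)).foldl pvBUpd b := by
    intro b j
    rw [← foldl_candOpt]
    exact List.foldl_ext _ _ b (fun acc x _ => pvBBody_eq _ _ _ acc x)
  have hfold2 : (PySem.List.pyRange 1 ((changes.length : ℤ) + 1) 1).foldl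
      (fun best j => (PySem.List.pyRange 0 ((changes.length : ℤ) + 1) 1).foldl
        (pvBBody (pvBPrefix changes) changes.sum j) best) none = some t0 := by
    rw [List.foldl_ext _
        (fun best j => ((PySem.List.pyRange 0 ((changes.length : ℤ) + 1) 1).filterMap
          (pvCandOpt (pvBPrefix changes) changes.sum j)).foldl pvBUpd best) none
        (fun acc j _ => hstep1 acc j)]
    rw [foldl_flat (fun j => (PySem.List.pyRange 0 ((changes.length : ℤ) + 1) 1).filterMap
          (pvCandOpt (pvBPrefix changes) changes.sum j)) _ none]
    exact hfold
  unfold recurring_frequency_alt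
  simp only [pvPfx_last]
  rw [hfold2]

/- ---------- A side: one pass ---------- -/

theorem mem_foldl_add' (l : List Int) (s : PySem.Set Int) (y : Int) :
    y ∈ l.foldl PySem.Set.add s ↔ y ∈ s ∨ y ∈ l := by
  have h := PySem.Set.mem_foldl_add l id s y
  simpa using h

theorem mem_take_ex {x : Int} {l : List Int} {m : ℕ} (h : x ∈ l.take m) :
    ∃ m', ∃ (hm : m' < l.length), m' < m ∧ l[m'] = x := by
  obtain ⟨m', hm', he⟩ := List.mem_iff_getElem.1 h
  have hlen : m' < l.length := lt_of_lt_of_le hm' (by simp [List.length_take])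
  refine ⟨m', hlen, ?_, ?_⟩
  · have := List.length_take_le m l
    omega
  · rw [← he, List.getElem_take]

theorem getElem_mem_take {l : List Int} {m m' : ℕ} (hm : m' < l.length) (hlt : m' < m) :
    l[m'] ∈ l.take m := by
  have hl : m' < (l.take m).length := by simp [List.length_take]; omega
  have : (l.take m)[m'] = l[m'] := List.getElem_take
  rw [← this]
  exact List.getElem_mem hl

theorem pvAFor_clean (cs : List Int) : ∀ (r : Int) (seen : PySem.Set Int),
    (∀ m (h : m < cs.length),
        (pvPsums r cs)[m]'(by rw [pvPsums_length]; exact h) ∉ seen ∧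
        (pvPsums r cs)[m]'(by rw [pvPsums_length]; exact h) ∉ (pvPsums r cs).take m) →
    pvAFor cs r seen = .inr (r + cs.sum, (pvPsums r cs).foldl PySem.Set.add seen) := by
  induction cs with
  | nil => intro r seen _; simp [pvAFor, pvPsums]
  | cons c cs ih =>
      intro r seen hclean
      have h0 := hclean 0 (by simp)
      simp only [pvPsums, List.getElem_cons_zero] at h0
      have hnc : PySem.Set.contains seen (r + c) = false := by
        rw [Bool.eq_false_iff]
        intro hc
        exact h0.1 ((PySem.Set.contains_iff seen (r + c)).1 hc)
      unfold pvAFor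
      simp only [hnc, Bool.false_eq_true, if_false]
      rw [ih (r + c) (PySem.Set.add seen (r + c)) ?_]
      · simp only [pvPsums, List.foldl_cons, List.sum_cons]
        congr 2
        ring
      · intro m hm
        have h1 := hclean (m + 1) (by simpa using hm)
        simp only [pvPsums, List.getElem_cons_succ, List.take_succ_cons] at h1
        constructor
        · intro hmem
          rw [PySem.Set.mem_add] at hmem
          rcases hmem with h | h
          · exact h1.1 h
          · exact h1.2 (by rw [h]; exact List.mem_cons_self ..)
        · intro hmem
          exact h1.2 (List.mem_cons_of_mem _ hmem)

theorem pvAFor_hit (cs : List Int) : ∀ (r : Int) (seen : PySem.Set Int) (m₀ : ℕ)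
    (h₀ : m₀ < cs.length),
    ((pvPsums r cs)[m₀]'(by rw [pvPsums_length]; exact h₀) ∈ seen ∨
     (pvPsums r cs)[m₀]'(by rw [pvPsums_length]; exact h₀) ∈ (pvPsums r cs).take m₀) →
    (∀ m (hm : m < m₀),
        (pvPsums r cs)[m]'(by rw [pvPsums_length]; omega) ∉ seen ∧
        (pvPsums r cs)[m]'(by rw [pvPsums_length]; omega) ∉ (pvPsums r cs).take m) →
    pvAFor cs r seen = .inl ((pvPsums r cs)[m₀]'(by rw [pvPsums_length]; exact h₀)) := by
  induction cs with
  | nil => intro r seen m₀ h₀ _ _; simp at h₀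
  | cons c cs ih =>
      intro r seen m₀ h₀ hhit hpre
      cases m₀ with
      | zero =>
          have hmem : (r + c) ∈ seen := by
            simpa [pvPsums] using hhit
          unfold pvAFor
          simp only [(PySem.Set.contains_iff seen (r + c)).2 hmem, if_true, pvPsums,
            List.getElem_cons_zero]
      | succ m =>
          have h1 := hpre 0 (Nat.succ_pos m)
          simp only [pvPsums, List.getElem_cons_zero] at h1
          have hnc : PySem.Set.contains seen (r + c) = false := by
            rw [Bool.eq_false_iff]
            intro hc
            exact h1.1 ((PySem.Set.contains_iff seen (r + c)).1 hc)
          unfold pvAFor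
          simp only [hnc, Bool.false_eq_true, if_false, pvPsums, List.getElem_cons_succ]
          rw [ih (r + c) (PySem.Set.add seen (r + c)) m (by simpa using h₀) ?_ ?_]
          · have hh := hhit
            simp only [pvPsums, List.getElem_cons_succ, List.take_succ_cons] at hh
            rcases hh with h | h
            · exact Or.inl (by rw [PySem.Set.mem_add]; exact Or.inl h)
            · rcases List.mem_cons.1 h with h' | h'
              · exact Or.inl (by rw [PySem.Set.mem_add]; exact Or.inr h')
              · exact Or.inr h'
          · intro m' hm'
            have h2 := hpre (m' + 1) (by omega)
            simp only [pvPsums, List.getElem_cons_succ, List.take_succ_cons] at h2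
            constructor
            · intro hmem
              rw [PySem.Set.mem_add] at hmem
              rcases hmem with h | h
              · exact h2.1 h
              · exact h2.2 (by rw [h]; exact List.mem_cons_self ..)
            · intro hmem
              exact h2.2 (List.mem_cons_of_mem _ hmem)

/- ---------- A side: whole run ---------- -/

theorem pvCand_of_eq (changes : List Int) {k' m' k m : ℕ}
    (hm : m < changes.length) (hm' : m' < changes.length)
    (heq : pvPf changes (m + 1) + (k : ℤ) * changes.sum
         = pvPf changes (m' + 1) + (k' : ℤ) * changes.sum)
    (hord : k' < k ∨ (k' = k ∧ m' < m)) : pvCand changes (m' + 1) (m + 1) (k - k') := by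
  refine ⟨by omega, by omega, by omega, ?_, ?_⟩
  · have hk : k' ≤ k := by omega
    push_cast [Nat.cast_sub hk]
    linear_combination -heq
  · rcases hord with h | ⟨h1, h2⟩
    · left; omega
    · right; exact ⟨by omega, by omega⟩

theorem pvCand_of_zero (changes : List Int) {k m : ℕ} (hm : m < changes.length)
    (heq : pvPf changes (m + 1) + (k : ℤ) * changes.sum = 0) : pvCand changes 0 (m + 1) k := by
  refine ⟨by omega, by omega, by omega, ?_, ?_⟩
  · have h0 : pvPf changes 0 = 0 := by simp [pvPf]
    rw [h0]
    linarith [heq]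
  · rcases Nat.eq_zero_or_pos k with h | h
    · right; exact ⟨h, by omega⟩
    · left; exact h

theorem pvRunA (changes : List Int) (D J : ℕ) (hne : changes ≠ [])
    (hbest : pvIsBest changes D J) :
    ∀ (fuel k : ℕ) (seen : PySem.Set Int), k ≤ D → D - k < fuel →
    (∀ x : Int, x ∈ seen ↔ x = 0 ∨ ∃ k' < k, ∃ m < changes.length,
        x = pvPf changes (m + 1) + (k' : ℤ) * changes.sum) →
    pvAWhile changes fuel ((k : ℤ) * changes.sum) seen = pvPf changes J + (D : ℤ) * changes.sum := by
  intro fuel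
  induction fuel with
  | zero => intro k seen hk hf hs; omega
  | succ f ihf =>
      intro k seen hkD hfuel hseen
      have hn : 0 < changes.length := List.length_pos_of_ne_nil hne
      have hlen : (pvPsums ((k : ℤ) * changes.sum) changes).length = changes.length :=
        pvPsums_length _ _
      have hvals : ∀ m (hm : m < changes.length),
          (pvPsums ((k : ℤ) * changes.sum) changes)[m]'(by rw [hlen]; exact hm)
            = pvPf changes (m + 1) + (k : ℤ) * changes.sum := by
        intro m hm
        rw [pvPsums_getElem changes _ m hm]
        unfold pvPf
        ring
      by_cases hkD' : k < D
      · -- clean pass: no value of this pass has been seen before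
        have hclean : ∀ m (h : m < changes.length),
            (pvPsums ((k : ℤ) * changes.sum) changes)[m]'(by rw [hlen]; exact h) ∉ seen ∧
            (pvPsums ((k : ℤ) * changes.sum) changes)[m]'(by rw [hlen]; exact h)
              ∉ (pvPsums ((k : ℤ) * changes.sum) changes).take m := by
          intro m hm
          constructor
          · intro hmem
            rw [hseen _, hvals m hm] at hmem
            rcases hmem with h0 | ⟨k', hk', m', hm', he⟩
            · have hc := pvCand_of_zero changes hm h0
              rcases hbest.2 _ _ _ hc with h | h <;> omega
            · have hc := pvCand_of_eq changes hm hm' he (Or.inl hk')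
              rcases hbest.2 _ _ _ hc with h | h <;> omega
          · intro hmem
            obtain ⟨m', hlen', hlt', he'⟩ := mem_take_ex hmem
            have hm'2 : m' < changes.length := by rw [hlen] at hlen'; exact hlen'
            have heq2 : pvPf changes (m + 1) + (k : ℤ) * changes.sum
                = pvPf changes (m' + 1) + (k : ℤ) * changes.sum := by
              rw [← hvals m hm, ← hvals m' hm'2, he']
            have hc := pvCand_of_eq changes hm hm'2 heq2 (Or.inr ⟨rfl, hlt'⟩)
            rcases hbest.2 _ _ _ hc with h | h <;> omega
        unfold pvAWhile
        rw [pvAFor_clean changes _ seen hclean]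
        have hseen' : ∀ x : Int,
            x ∈ (pvPsums ((k : ℤ) * changes.sum) changes).foldl PySem.Set.add seen ↔
              x = 0 ∨ ∃ k' < k + 1, ∃ m < changes.length,
                x = pvPf changes (m + 1) + (k' : ℤ) * changes.sum := by
          intro x
          rw [mem_foldl_add']
          constructor
          · rintro (hx | hx)
            · rcases (hseen x).1 hx with h | ⟨k', hk', m, hm, he⟩
              · exact Or.inl h
              · exact Or.inr ⟨k', by omega, m, hm, he⟩
            · obtain ⟨m, hmlt, he⟩ := List.mem_iff_getElem.1 hx
              have hm2 : m < changes.length := by rw [hlen] at hmlt; exact hmlt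
              exact Or.inr ⟨k, by omega, m, hm2, by rw [← he, hvals m hm2]⟩
          · rintro (rfl | ⟨k', hk', m, hm, rfl⟩)
            · exact Or.inl ((hseen 0).2 (Or.inl rfl))
            · by_cases hk'' : k' < k
              · exact Or.inl ((hseen _).2 (Or.inr ⟨k', hk'', m, hm, rfl⟩))
              · have hkk : k' = k := by omega
                subst hkk
                right
                rw [List.mem_iff_getElem]
                exact ⟨m, by rw [hlen]; exact hm, hvals m hm⟩
        have hrec := ihf (k + 1) _ (by omega) (by omega) hseen'
        have harg : (k : ℤ) * changes.sum + changes.sum = ((k + 1 : ℕ) : ℤ) * changes.sum := by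
          push_cast; ring
        show pvAWhile changes f ((k : ℤ) * changes.sum + changes.sum)
            ((pvPsums ((k : ℤ) * changes.sum) changes).foldl PySem.Set.add seen)
            = pvPf changes J + (D : ℤ) * changes.sum
        rw [harg]
        exact hrec
      · -- k = D: this pass hits the first repeat, at in-pass position J-1
        have hkD2 : k = D := by omega
        obtain ⟨iW, hcW⟩ := hbest.1
        have hJn : J ≤ changes.length := hcW.2.2.1
        have hJ1 : 1 ≤ J := hcW.2.1
        have hJlt : J - 1 < changes.length := by omega
        have hJs : J - 1 + 1 = J := by omega
        have hvJ : (pvPsums ((k : ℤ) * changes.sum) changes)[J-1]'(by rw [hlen]; exact hJlt)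
            = pvPf changes J + (k : ℤ) * changes.sum := by
          rw [hvals (J-1) hJlt, hJs]
        have hWeq : pvPf changes iW = pvPf changes J + (k : ℤ) * changes.sum := by
          have h := hcW.2.2.2.1
          have hcast : (k : ℤ) = (D : ℤ) := by omega
          rw [hcast]
          linarith [h]
        have hhit : (pvPsums ((k : ℤ) * changes.sum) changes)[J-1]'(by rw [hlen]; exact hJlt) ∈ seen ∨
            (pvPsums ((k : ℤ) * changes.sum) changes)[J-1]'(by rw [hlen]; exact hJlt)
              ∈ (pvPsums ((k : ℤ) * changes.sum) changes).take (J-1) := by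
          by_cases hiW0 : iW = 0
          · left
            rw [hvJ]
            apply (hseen _).2
            left
            rw [← hWeq, hiW0]
            simp [pvPf]
          · rcases hcW.2.2.2.2 with hDpos | ⟨hD0, hij⟩
            · left
              rw [hvJ]
              apply (hseen _).2
              right
              have hiW1 : iW - 1 + 1 = iW := by omega
              have hiWn : iW ≤ changes.length := hcW.1
              refine ⟨0, by omega, iW - 1, by omega, ?_⟩
              rw [hiW1, ← hWeq]
              simp
            · right
              subst hD0
              have hiW1 : iW - 1 + 1 = iW := by omega
              have hiWn : iW ≤ changes.length := hcW.1
              have hiWlt : iW - 1 < changes.length := by omega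
              have hval' : (pvPsums ((k : ℤ) * changes.sum) changes)[iW-1]'(by rw [hlen]; omega)
                  = pvPf changes iW + (k : ℤ) * changes.sum := by
                rw [hvals (iW-1) hiWlt, hiW1]
              have : (pvPsums ((k : ℤ) * changes.sum) changes)[J-1]'(by rw [hlen]; exact hJlt)
                  = (pvPsums ((k : ℤ) * changes.sum) changes)[iW-1]'(by rw [hlen]; omega) := by
                have hk0 : (k : ℤ) = 0 := by omega
                rw [hvJ, hval', hWeq, hk0]
                ring
              rw [this]
              exact getElem_mem_take (by rw [hlen]; omega) (by omega)
        have hpre : ∀ m (hm : m < J - 1),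
            (pvPsums ((k : ℤ) * changes.sum) changes)[m]'(by rw [hlen]; omega) ∉ seen ∧
            (pvPsums ((k : ℤ) * changes.sum) changes)[m]'(by rw [hlen]; omega)
              ∉ (pvPsums ((k : ℤ) * changes.sum) changes).take m := by
          intro m hm
          have hmlt : m < changes.length := by omega
          constructor
          · intro hmem
            rw [hseen _, hvals m hmlt] at hmem
            rcases hmem with h0 | ⟨k', hk', m', hm', he⟩
            · have hc := pvCand_of_zero changes hmlt h0
              rcases hbest.2 _ _ _ hc with h | h <;> omega
            · have hc := pvCand_of_eq changes hmlt hm' he (Or.inl hk')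
              rcases hbest.2 _ _ _ hc with h | h <;> omega
          · intro hmem
            obtain ⟨m', hlen', hlt', he'⟩ := mem_take_ex hmem
            have hm'2 : m' < changes.length := by rw [hlen] at hlen'; exact hlen'
            have heq2 : pvPf changes (m + 1) + (k : ℤ) * changes.sum
                = pvPf changes (m' + 1) + (k : ℤ) * changes.sum := by
              rw [← hvals m hmlt, ← hvals m' hm'2, he']
            have hc := pvCand_of_eq changes hmlt hm'2 heq2 (Or.inr ⟨rfl, hlt'⟩)
            rcases hbest.2 _ _ _ hc with h | h <;> omega
        unfold pvAWhile
        rw [pvAFor_hit changes _ seen (J-1) hJlt hhit hpre]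
        rw [hvJ, hkD2]

theorem pvD_lt_fuel (changes : List Int) (D J : ℕ) (hne : changes ≠ [])
    (hbest : pvIsBest changes D J) :
    D < 2 * (changes.map Int.natAbs).sum + 2 := by
  obtain ⟨iW, hcW⟩ := hbest.1
  by_cases hT : changes.sum = 0
  · have := bestD_zero changes D J hne hbest hT
    omega
  · have heq := hcW.2.2.2.1
    have e1 : (pvPf changes iW - pvPf changes J).natAbs = D * changes.sum.natAbs := by
      rw [heq, Int.natAbs_mul, Int.natAbs_natCast]
    have e2 : (pvPf changes iW - pvPf changes J).natAbs
        ≤ (pvPf changes iW).natAbs + (pvPf changes J).natAbs := Int.natAbs_sub_le _ _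
    have e3 := pvPf_natAbs_le changes iW
    have e4 := pvPf_natAbs_le changes J
    have e5 : 1 ≤ changes.sum.natAbs := by omega
    have e6 : D = D * 1 := (Nat.mul_one D).symm
    have e7 : D * 1 ≤ D * changes.sum.natAbs := Nat.mul_le_mul_left D e5
    omega

theorem a_eq_best (changes : List Int) (D J : ℕ)
    (hne : changes ≠ []) (hbest : pvIsBest changes D J) :
    recurring_frequency changes = pvPf changes J + (D : ℤ) * changes.sum := by
  unfold recurring_frequency
  have h0 : ∀ x : Int, x ∈ PySem.Set.ofList [0] ↔ x = 0 ∨ ∃ k' : ℕ, k' < 0 ∧ ∃ m < changes.length,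
      x = pvPf changes (m + 1) + (k' : ℤ) * changes.sum := by
    intro x
    rw [PySem.Set.mem_ofList]
    constructor
    · intro hx
      exact Or.inl (by simpa using hx)
    · rintro (rfl | ⟨k', hk', _⟩)
      · simp
      · omega
  have hrun := pvRunA changes D J hne hbest (2 * (changes.map Int.natAbs).sum + 2) 0
    (PySem.Set.ofList [0]) (Nat.zero_le D)
    (by have := pvD_lt_fuel changes D J hne hbest; omega) h0
  simpa using hrun

/- ---------- existence of the best pair ---------- -/

theorem pre_exists_best (changes : List Int) (hpre : Pre_recurring_frequency changes) :
    ∃ D J, pvIsBest changes D J := by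
  obtain ⟨hne, i, hi, j, hj, hj1, hcond⟩ := hpre
  have hex : ∃ d, ∃ i' < changes.length + 1, ∃ j' < changes.length + 1,
      pvCand changes i' j' d := by
    by_cases hT : changes.sum = 0
    · rw [if_pos hT] at hcond
      exact ⟨0, i, hi, j, hj, by omega, hj1, by omega, by rw [hT]; omega,
        Or.inr ⟨rfl, hcond.2⟩⟩
    · rw [if_neg hT] at hcond
      obtain ⟨⟨q, hq⟩, hcond2⟩ := hcond
      have hdiv : (pvPf changes i - pvPf changes j) / changes.sum = q := by
        rw [hq]
        exact Int.mul_ediv_cancel_left q hT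
      rcases hcond2 with hpos | ⟨heqv, hij⟩
      · rw [hdiv] at hpos
        refine ⟨q.toNat, i, hi, j, hj, by omega, hj1, by omega, ?_, Or.inl (by omega)⟩
        rw [Int.toNat_of_nonneg (by omega)]
        rw [hq]; ring
      · refine ⟨0, i, hi, j, hj, by omega, hj1, by omega, by omega, Or.inr ⟨rfl, hij⟩⟩
  haveI hdec : DecidablePred (fun d => ∃ i' < changes.length + 1, ∃ j' < changes.length + 1,
      pvCand changes i' j' d) := fun d => by unfold pvCand; infer_instance
  obtain ⟨iD, hiD, jD, hjD, hcD⟩ := Nat.find_spec hex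
  have hexJ : ∃ jj, ∃ i' < changes.length + 1, pvCand changes i' jj (Nat.find hex) :=
    ⟨jD, iD, hiD, hcD⟩
  haveI hdec2 : DecidablePred (fun jj => ∃ i' < changes.length + 1,
      pvCand changes i' jj (Nat.find hex)) := fun jj => by unfold pvCand; infer_instance
  obtain ⟨iJ, hiJ, hcJ⟩ := Nat.find_spec hexJ
  refine ⟨Nat.find hex, Nat.find hexJ, ⟨iJ, hcJ⟩, ?_⟩
  intro i' j' d' hc'
  have hd' : Nat.find hex ≤ d' :=
    Nat.find_min' hex ⟨i', by have := hc'.1; omega, j', by have := hc'.2.2.1; omega, hc'⟩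
  rcases Nat.lt_or_ge (Nat.find hex) d' with h | h
  · exact Or.inl h
  · have hdd : d' = Nat.find hex := by omega
    subst hdd
    right
    exact ⟨rfl, Nat.find_min' hexJ ⟨i', by have := hc'.1; omega, hc'⟩⟩

-- ===== VERDICT (by name: the statement is the Claim_ definition above) =====
theorem recurring_frequency_spec : Claim_equal_recurring_frequency := by
  intro changes _ hpre
  obtain ⟨D, J, hbest⟩ := pre_exists_best changes hpre
  have hne := hpre.1
  unfold Spec_recurring_frequency
  rw [a_eq_best changes D J hne hbest, alt_eq_best changes D J hne hbest]
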